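-- pv_equiv track=rewrite | github.com/noamsin2/soft.eng-assignments | Principles of programming languages - Python/hw #1/hw1.py | min_dig
-- ===== SOURCE A (Python) =====
-- def min_dig(num):
--     """
--     exercise #4
--     this function returns the smallest digit in a number
--     :param num = 98720:
--     :return 0:
--     """
--     if num == 0:
--         return 9
--     min = min_dig(num // 10)
--     if num % 10 <= min:
--         return num % 10
--     else:
--         return min
-- ===== SOURCE B (Python) =====
-- def min_dig(num):
--     m = 9
--     while num > 0:
--         m = min(m, num % 10)
--         num //= 10
--     return m
-- ===== Notes on version B (the rewrite author's own statement) =====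
-- stated objective: simpler
-- what changed: Replaces the post-recursion minimum computation with an iterative accumulator loop: a running minimum (initialized to 9, the recursion's base value) is folded with min over the digits extracted low-to-high.
import Mathlib
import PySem

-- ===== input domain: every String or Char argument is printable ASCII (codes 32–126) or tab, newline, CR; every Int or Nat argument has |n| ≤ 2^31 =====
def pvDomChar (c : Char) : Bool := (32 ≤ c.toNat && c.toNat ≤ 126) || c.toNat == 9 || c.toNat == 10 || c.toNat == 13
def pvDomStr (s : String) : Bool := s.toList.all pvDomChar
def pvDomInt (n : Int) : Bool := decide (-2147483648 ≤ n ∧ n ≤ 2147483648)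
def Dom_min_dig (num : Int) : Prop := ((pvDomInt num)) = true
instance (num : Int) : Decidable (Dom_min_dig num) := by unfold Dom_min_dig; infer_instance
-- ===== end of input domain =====

-- B replaces A's recursion with an iterative running-minimum accumulator loop (objective: simpler).


-- ===== PORT A =====
-- literal port of A's recursion; the 'num < 0' branch is unreachable under Pre_
-- (there Python recurses forever and raises RecursionError).
def min_dig (num : Int) : Int :=
  if num = 0 then 9
  else if num < 0 then 9
  else
    let m := min_dig (PySem.Int.floordiv num 10)
    if PySem.Int.mod num 10 ≤ m then PySem.Int.mod num 10 else m
termination_by num.toNat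
decreasing_by
  have h1 : PySem.Int.floordiv num 10 = num / 10 :=
    PySem.Int.floordiv_eq_ediv_of_pos (by omega)
  have h2 : num / 10 < num := by omega
  have h3 : 0 ≤ num / 10 := by omega
  omega

-- ===== PORT B =====
-- the while-loop of Source B; since its guard is 'num > 0', the loop only ever
-- runs on nonnegative values, so it is transcribed over Nat (where Python's
-- '// 10' and '% 10' are exactly Nat division and remainder); for num ≤ 0
-- the guard fails at once and the accumulator 9 is returned, as in Python.
def min_dig_alt_go (n : Nat) (m : Int) : Int :=
  if h : n = 0 then m
  else min_dig_alt_go (n / 10) (min m ((n % 10 : Nat) : Int))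
termination_by n
decreasing_by exact Nat.div_lt_self (Nat.pos_of_ne_zero h) (by norm_num)

def min_dig_alt (num : Int) : Int := min_dig_alt_go num.toNat 9

-- ===== PRECONDITION & SPEC =====
-- Pre_ excludes negative inputs, on which A recurses forever (floor division never reaches zero) and raises RecursionError.
def Pre_min_dig (num : Int) : Prop := 0 ≤ num
instance (num : Int) : Decidable (Pre_min_dig num) := by unfold Pre_min_dig; infer_instance
def pvWitness_min_dig : Int := (98720)

def Spec_min_dig (num : Int) (out : Int) : Prop := out = min_dig_alt num
instance (num : Int) (out : Int) : Decidable (Spec_min_dig num out) := by unfold Spec_min_dig; infer_instance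

-- ===== CLAIM (what is proved, stated in full; the proofs are below) =====
def Claim_equal_min_dig : Prop := ∀ (num : Int), Dom_min_dig num → Pre_min_dig num → Spec_min_dig num (min_dig num)

-- ===== LEMMAS AND PROOFS =====

lemma min_dig_le_nine (num : Int) : min_dig num ≤ 9 := by
  rw [min_dig]
  split
  · omega
  · split
    · omega
    · have hmod : PySem.Int.mod num 10 = num % 10 := PySem.Int.mod_eq_emod_of_pos (by omega)
      have h1 : 0 ≤ num % 10 := Int.emod_nonneg num (by omega)
      have h2 : num % 10 < 10 := Int.emod_lt_of_pos num (by omega)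
      dsimp only
      split <;> omega

-- A's recursion on a positive number takes the min of the low digit and the recursive value.
lemma min_dig_pos (num : Int) (h : 0 < num) :
    min_dig num = min (num % 10) (min_dig (num / 10)) := by
  rw [min_dig]
  have hdiv : PySem.Int.floordiv num 10 = num / 10 :=
    PySem.Int.floordiv_eq_ediv_of_pos (by omega)
  have hmod : PySem.Int.mod num 10 = num % 10 := PySem.Int.mod_eq_emod_of_pos (by omega)
  simp only [if_neg (by omega : ¬ num = 0), if_neg (by omega : ¬ num < 0), hdiv, hmod]
  rw [Int.min_def]

-- the accumulator loop computes the min of its seed with A's value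
lemma go_eq_min (n : Nat) : ∀ m : Int, m ≤ 9 →
    min_dig_alt_go n m = min m (min_dig (n : Int)) := by
  induction n using Nat.strong_induction_on with
  | _ n ih =>
    intro m hm9
    rw [min_dig_alt_go]
    by_cases h0 : n = 0
    · rw [dif_pos h0, h0]
      show m = min m (min_dig 0)
      rw [min_dig]
      simp only [Int.min_def]
      split_ifs <;> omega
    · have hpos : (0 : Int) < (n : Int) := by exact_mod_cast Nat.pos_of_ne_zero h0
      have hm : ((n % 10 : Nat) : Int) = (n : Int) % 10 := by push_cast; ring_nf
      have hd : ((n / 10 : Nat) : Int) = (n : Int) / 10 := by push_cast; ring_nf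
      have h9 : min_dig ((n : Int) / 10) ≤ 9 := min_dig_le_nine _
      have hlt : (0:Int) ≤ (n:Int) % 10 ∧ (n:Int) % 10 < 10 :=
        ⟨Int.emod_nonneg _ (by omega), Int.emod_lt_of_pos _ (by omega)⟩
      rw [dif_neg h0, ih (n / 10) (Nat.div_lt_self (Nat.pos_of_ne_zero h0) (by norm_num))
          _ (by rw [hm]; simp only [Int.min_def]; split_ifs <;> omega),
        min_dig_pos (n : Int) hpos, hm, hd]
      simp only [Int.min_def]
      split_ifs <;> omega

-- ===== VERDICT (by name: the statement is the Claim_ definition above) =====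
theorem min_dig_spec : Claim_equal_min_dig := by
  intro num _ hpre
  unfold Spec_min_dig min_dig_alt
  rw [go_eq_min _ _ le_rfl, Int.toNat_of_nonneg hpre]
  have h9 := min_dig_le_nine num
  simp only [Int.min_def]
  split_ifs <;> omega
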